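-- pv_equiv track=rewrite | github.com/tiago-ferrari/sasc | backend/app/utils.py | dict_treat
-- ===== SOURCE A (Python) =====
-- def dict_treat(dictionary):
--     symbols = {
--         "&": "and_symbol",
--         "(": "parentheses_left_symbol",
--         ")": "parentheses_right_symbol",
--     }
--
--     new_dict = {}
--
--     for i in dictionary:
--         element = dictionary[i]
--         for symbol in symbols:
--             if symbols[symbol] in element:
--                 element = element.replace(symbols[symbol], symbol)
--         new_dict[i] = element
--
--     return new_dict
-- ===== SOURCE B (Python) =====
-- import re
--
-- _MAPPING = {
--     "and_symbol": "&",
--     "parentheses_left_symbol": "(",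
--     "parentheses_right_symbol": ")",
-- }
-- _PATTERN = re.compile("and_symbol|parentheses_left_symbol|parentheses_right_symbol")
--
--
-- def dict_treat(dictionary):
--     return {
--         key: _PATTERN.sub(lambda m: _MAPPING[m.group(0)], value)
--         for key, value in dictionary.items()
--     }
-- ===== Notes on version B (the rewrite author's own statement) =====
-- stated objective: alternative
-- what changed: Replaces A's three sequential str.replace scans per value (each guarded by an 'in' test) with one precompiled regex alternation that rewrites all three placeholders in a single left-to-right pass per value, valid because the placeholders never overlap and their single-character replacements cannot create new placeholders.
import Mathlib
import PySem

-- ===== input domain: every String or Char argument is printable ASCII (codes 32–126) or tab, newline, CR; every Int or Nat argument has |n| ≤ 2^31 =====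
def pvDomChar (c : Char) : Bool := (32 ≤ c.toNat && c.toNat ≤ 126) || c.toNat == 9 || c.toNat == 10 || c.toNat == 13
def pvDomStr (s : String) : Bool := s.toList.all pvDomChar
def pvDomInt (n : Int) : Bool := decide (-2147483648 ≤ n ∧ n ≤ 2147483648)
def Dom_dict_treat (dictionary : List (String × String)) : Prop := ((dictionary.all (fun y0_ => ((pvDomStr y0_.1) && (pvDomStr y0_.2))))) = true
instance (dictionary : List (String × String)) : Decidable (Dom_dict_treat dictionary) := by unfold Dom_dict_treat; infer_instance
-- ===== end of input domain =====

-- B replaces A's three sequential `.replace` scans per value by a single left-to-right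
-- scan trying the three placeholders at each position (Source B: one precompiled regex
-- alternation); objective: alternative (same asymptotic cost, one pass instead of three).

-- ===== PORT A =====
-- Python A receives a dict; the assoc-list argument is read as that dict
-- (PySem.Dict.ofList = Python's dict(pairs): first position, last value).
def dict_treat (dictionary : List (String × String)) : List (String × String) :=
  -- symbols = {"&": "and_symbol", "(": "parentheses_left_symbol", ")": "parentheses_right_symbol"}
  let symbols : PySem.Dict String String :=
    PySem.Dict.ofList [("&", "and_symbol"), ("(", "parentheses_left_symbol"), (")", "parentheses_right_symbol")]
  let d : PySem.Dict String String := PySem.Dict.ofList dictionary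
  -- for i in dictionary: element = dictionary[i]; for symbol in symbols: …; new_dict[i] = element
  let new_dict : PySem.Dict String String :=
    d.keys.foldl (fun nd i =>
      -- dictionary[i] cannot raise for i ∈ keys; getD "" is exact there
      let element := d.getD i ""
      let element := symbols.keys.foldl (fun el symbol =>
        if PySem.Str.isIn (symbols.getD symbol "") el
        then PySem.Str.replace el (symbols.getD symbol "") symbol
        else el) element
      nd.insert i element) PySem.Dict.empty
  new_dict.items

-- ===== PORT B =====
-- Source B's regex alternation "and_symbol|parentheses_left_symbol|parentheses_right_symbol":
-- at each index, try the alternatives left to right; on a match emit the mapped symbol and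
-- jump past the match, otherwise copy one character.
def pvAnd : List Char := "and_symbol".toList
def pvPL : List Char := "parentheses_left_symbol".toList
def pvPR : List Char := "parentheses_right_symbol".toList

def pvScan : List Char → List Char
  | [] => []
  | c :: t =>
    if pvAnd.isPrefixOf (c :: t) then '&' :: pvScan (List.drop (pvAnd.length - 1) t)
    else if pvPL.isPrefixOf (c :: t) then '(' :: pvScan (List.drop (pvPL.length - 1) t)
    else if pvPR.isPrefixOf (c :: t) then ')' :: pvScan (List.drop (pvPR.length - 1) t)
    else c :: pvScan t
  termination_by l => l.length
  decreasing_by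
    all_goals (simp; try omega)

def dict_treat_alt (dictionary : List (String × String)) : List (String × String) :=
  (PySem.Dict.ofList dictionary).items.map
    (fun p => (p.1, String.ofList (pvScan p.2.toList)))

-- ===== PRECONDITION & SPEC =====
def Spec_dict_treat (dictionary : List (String × String)) (out : List (String × String)) : Prop := out = dict_treat_alt dictionary
instance (dictionary : List (String × String)) (out : List (String × String)) : Decidable (Spec_dict_treat dictionary out) := by unfold Spec_dict_treat; infer_instance

-- ===== CLAIM (what is proved, stated in full; the proofs are below) =====
def Claim_equal_dict_treat : Prop := ∀ (dictionary : List (String × String)), Dom_dict_treat dictionary → Spec_dict_treat dictionary (dict_treat dictionary)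

-- ===== LEMMAS AND PROOFS =====

-- tails of the patterns (used to reason about heads)
def pvAndT : List Char := "nd_symbol".toList
def pvPLT : List Char := "arentheses_left_symbol".toList
def pvPRT : List Char := "arentheses_right_symbol".toList

theorem pvAnd_eq : pvAnd = 'a' :: pvAndT := rfl
theorem pvPL_eq : pvPL = 'p' :: pvPLT := rfl
theorem pvPR_eq : pvPR = 'p' :: pvPRT := rfl

-- pvRep pat new l : Python's l.replace(pat, new) as the natural left-to-right recursion
def pvRep (pat new : List Char) : List Char → List Char
  | [] => []
  | c :: t =>
    if pat.isPrefixOf (c :: t) then new ++ pvRep pat new (List.drop (pat.length - 1) t)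
    else c :: pvRep pat new t
  termination_by l => l.length
  decreasing_by all_goals (simp; try omega)

theorem pvRep_nil (pat new : List Char) : pvRep pat new [] = [] := by simp [pvRep]

theorem pvRep_cons_of_ne (pat new : List Char) (c : Char) (t : List Char)
    (h : ¬ pat.isPrefixOf (c :: t)) : pvRep pat new (c :: t) = c :: pvRep pat new t := by
  rw [pvRep]; simp [h]

theorem pvRep_append_self (pat new y : List Char) (hne : pat ≠ []) :
    pvRep pat new (pat ++ y) = new ++ pvRep pat new y := by
  cases pat with
  | nil => exact absurd rfl hne
  | cons p0 pt =>
    show pvRep (p0 :: pt) new (p0 :: (pt ++ y)) = _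
    rw [pvRep]
    have hp : (p0 :: pt).isPrefixOf (p0 :: (pt ++ y)) := by
      rw [List.isPrefixOf_iff_prefix]
      exact (List.prefix_append (p0 :: pt) y).trans (by simp)
    simp only [hp, if_pos]
    have : List.drop ((p0 :: pt).length - 1) (pt ++ y) = y := by
      simp [List.drop_left]
    rw [this]

theorem pvGo_eq (old new : List Char) (hne : old ≠ []) :
    ∀ (fuel : Nat) (l acc : List Char), l.length ≤ fuel →
      PySem.Chars.replace.go old new fuel l acc = acc.reverse ++ pvRep old new l := by
  intro fuel
  induction fuel with
  | zero =>
    intro l acc h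
    have : l = [] := by cases l <;> simp_all
    subst this
    rw [PySem.Chars.replace.go.eq_def]
    simp [pvRep_nil]
  | succ n ih =>
    intro l acc h
    cases l with
    | nil =>
      rw [PySem.Chars.replace.go.eq_def]
      simp [pvRep_nil]
    | cons c t =>
      rw [PySem.Chars.replace.go.eq_def]
      by_cases hp : old.isPrefixOf (c :: t)
      · simp only [hp, if_pos]
        obtain ⟨o0, ot⟩ : ∃ o0 ot, old = o0 :: ot := by
          cases old with
          | nil => exact absurd rfl hne
          | cons a b => exact ⟨a, b, rfl⟩
        obtain ⟨ot, rfl⟩ := ot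
        have hdrop : List.drop (o0 :: ot).length (c :: t) = List.drop ((o0 :: ot).length - 1) t := by
          simp
        have hlen : (List.drop ((o0 :: ot).length - 1) t).length ≤ n := by
          simp at h ⊢; omega
        rw [hdrop, ih _ _ hlen]
        rw [pvRep]
        simp [hp]
      · simp only [hp, if_neg, ite_false]
        have hlen : t.length ≤ n := by simp at h; omega
        rw [ih _ _ hlen, pvRep_cons_of_ne _ _ _ _ hp]
        simp

theorem pvReplace_eq (s old new : List Char) (hne : old ≠ []) :
    PySem.Chars.replace s old new = pvRep old new s := by
  unfold PySem.Chars.replace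
  rw [if_neg (by simp [hne])]
  simpa using pvGo_eq old new hne s.length s [] le_rfl

theorem pvRep_of_not_infix (pat new l : List Char) (h : ¬ pat <:+: l) :
    pvRep pat new l = l := by
  induction l with
  | nil => exact pvRep_nil _ _
  | cons c t ih =>
    have hp : ¬ pat.isPrefixOf (c :: t) := by
      intro hc
      exact h ((List.isPrefixOf_iff_prefix.mp hc).isInfix)
    rw [pvRep_cons_of_ne _ _ _ _ hp, ih (fun hi => h (List.infix_cons hi))]

theorem pvRep_skip (pat new : List Char) :
    ∀ (blk r : List Char), (∀ j, j < blk.length → ¬ pat.isPrefixOf (blk.drop j ++ r)) →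
      pvRep pat new (blk ++ r) = blk ++ pvRep pat new r := by
  intro blk
  induction blk with
  | nil => intro r _; simp
  | cons c b ih =>
    intro r h
    have h0 : ¬ pat.isPrefixOf (c :: (b ++ r)) := by
      have := h 0 (by simp)
      simpa using this
    have : pvRep pat new ((c :: b) ++ r) = c :: pvRep pat new (b ++ r) :=
      pvRep_cons_of_ne _ _ _ _ h0
    rw [this, ih r (fun j hj => by
      have := h (j + 1) (by simp; omega)
      simpa using this)]
    rfl

-- an occurrence of pat strictly inside blk ++ r, starting inside blk, forces a
-- prefix relation between pat and a suffix of blk (decidable on concrete blk/pat)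
theorem pvNoOcc (pat blk : List Char)
    (h : ∀ j, j < blk.length → ¬ pat.isPrefixOf (blk.drop j) ∧ ¬ (blk.drop j).isPrefixOf pat) :
    ∀ (r : List Char) (j : Nat), j < blk.length → ¬ pat.isPrefixOf (blk.drop j ++ r) := by
  intro r j hj hp
  rw [List.isPrefixOf_iff_prefix] at hp
  by_cases hlen : pat.length ≤ (blk.drop j).length
  · apply (h j hj).1
    rw [List.isPrefixOf_iff_prefix]
    have h1 : pat = (blk.drop j ++ r).take pat.length := by
      obtain ⟨w, hw⟩ := hp
      rw [← hw]; simp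
    rw [List.take_append, Nat.sub_eq_zero_of_le hlen, List.take_zero, List.append_nil] at h1
    rw [h1]
    exact List.take_prefix _ _
  · apply (h j hj).2
    rw [List.isPrefixOf_iff_prefix]
    obtain ⟨w, hw⟩ := hp
    have h1 : blk.drop j = (blk.drop j ++ r).take (blk.drop j).length := by simp
    rw [← hw, List.take_append, Nat.sub_eq_zero_of_le (by omega), List.take_zero,
      List.append_nil] at h1
    rw [h1]
    exact List.take_prefix _ _

theorem pvFact_AND_PL : ∀ j, j < pvPL.length →
    ¬ pvAnd.isPrefixOf (pvPL.drop j) ∧ ¬ (pvPL.drop j).isPrefixOf pvAnd := by decide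

theorem pvFact_AND_PR : ∀ j, j < pvPR.length →
    ¬ pvAnd.isPrefixOf (pvPR.drop j) ∧ ¬ (pvPR.drop j).isPrefixOf pvAnd := by decide

theorem pvFact_PL_PR : ∀ j, j < pvPR.length →
    ¬ pvPL.isPrefixOf (pvPR.drop j) ∧ ¬ (pvPR.drop j).isPrefixOf pvPL := by decide

-- a sym-free prefix of (l.replace(pat, sym)) is a prefix of l (the scan copies
-- characters verbatim until the first match, which emits sym)
theorem pvTransfer (pat : List Char) (sym : Char) :
    ∀ (n : Nat) (t p : List Char), t.length ≤ n → sym ∉ p →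
      p.isPrefixOf (pvRep pat [sym] t) → p.isPrefixOf t := by
  intro n
  induction n with
  | zero =>
    intro t p ht _ hp
    have : t = [] := by cases t <;> simp_all
    subst this
    rwa [pvRep_nil] at hp
  | succ n ih =>
    intro t p ht hsym hp
    cases t with
    | nil => rwa [pvRep_nil] at hp
    | cons c t' =>
      by_cases hpre : pat.isPrefixOf (c :: t')
      · rw [pvRep] at hp
        simp only [hpre, if_pos] at hp
        cases p with
        | nil => simp
        | cons q p' =>
          simp only [List.cons_append, List.isPrefixOf] at hp
          have : q = sym := by
            have := hp
            simp at this
            exact this.1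
          exact absurd (this ▸ List.mem_cons_self) hsym
      · rw [pvRep_cons_of_ne _ _ _ _ hpre] at hp
        cases p with
        | nil => simp
        | cons q p' =>
          simp only [List.isPrefixOf] at hp
          have hq : q = c := by
            have := hp
            simp at this
            exact this.1
          have hp' : p'.isPrefixOf (pvRep pat [sym] t') := by
            simp at hp
            exact List.isPrefixOf_iff_prefix.mpr hp.2
          have := ih t' p' (by simp at ht; omega)
            (fun hm => hsym (List.mem_cons_of_mem _ hm)) hp'
          subst hq
          simp [List.isPrefixOf, this]

theorem pvScan_and (r : List Char) : pvScan (pvAnd ++ r) = '&' :: pvScan r := by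
  rw [pvAnd_eq, List.cons_append, pvScan]
  have hp : pvAnd.isPrefixOf ('a' :: (pvAndT ++ r)) := by
    rw [pvAnd_eq, List.isPrefixOf_iff_prefix]
    simp
  rw [if_pos hp]
  have : List.drop (pvAnd.length - 1) (pvAndT ++ r) = r := by
    have : pvAnd.length - 1 = pvAndT.length := by decide
    rw [this, List.drop_left]
  rw [this]

theorem pvScan_pl (r : List Char) (hA : ¬ pvAnd.isPrefixOf (pvPL ++ r)) :
    pvScan (pvPL ++ r) = '(' :: pvScan r := by
  rw [pvPL_eq, List.cons_append, pvScan]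
  rw [← List.cons_append, ← pvPL_eq]
  have hp : pvPL.isPrefixOf (pvPL ++ r) := by
    rw [List.isPrefixOf_iff_prefix]; exact List.prefix_append _ _
  rw [if_neg (by rw [pvPL_eq, List.cons_append] at hA ⊢; exact hA), if_pos hp]
  have : List.drop (pvPL.length - 1) (pvPLT ++ r) = r := by
    have : pvPL.length - 1 = pvPLT.length := by decide
    rw [this, List.drop_left]
  rw [this]

theorem pvScan_pr (r : List Char) (hA : ¬ pvAnd.isPrefixOf (pvPR ++ r))
    (hL : ¬ pvPL.isPrefixOf (pvPR ++ r)) :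
    pvScan (pvPR ++ r) = ')' :: pvScan r := by
  rw [pvPR_eq, List.cons_append, pvScan]
  rw [← List.cons_append, ← pvPR_eq]
  have hp : pvPR.isPrefixOf (pvPR ++ r) := by
    rw [List.isPrefixOf_iff_prefix]; exact List.prefix_append _ _
  rw [if_neg (by rw [pvPR_eq, List.cons_append] at hA ⊢; exact hA),
    if_neg (by rw [pvPR_eq, List.cons_append] at hL ⊢; exact hL), if_pos hp]
  have : List.drop (pvPR.length - 1) (pvPRT ++ r) = r := by
    have : pvPR.length - 1 = pvPRT.length := by decide
    rw [this, List.drop_left]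
  rw [this]

theorem pvScan_cons_none (c : Char) (t : List Char)
    (hA : ¬ pvAnd.isPrefixOf (c :: t)) (hL : ¬ pvPL.isPrefixOf (c :: t))
    (hR : ¬ pvPR.isPrefixOf (c :: t)) : pvScan (c :: t) = c :: pvScan t := by
  rw [pvScan]
  simp [hA, hL, hR]

theorem pvNotPrefix_head (a b : Char) (l₁ l₂ : List Char) (h : a ≠ b) :
    ¬ (a :: l₁).isPrefixOf (b :: l₂) := by
  simp [List.isPrefixOf, h]

-- the heart: three sequential replaces equal B's single scan
theorem pvMain : ∀ (n : Nat) (l : List Char), l.length ≤ n →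
    pvRep pvPR [')'] (pvRep pvPL ['('] (pvRep pvAnd ['&'] l)) = pvScan l := by
  intro n
  induction n with
  | zero =>
    intro l h
    have : l = [] := by cases l <;> simp_all
    subst this
    simp [pvRep_nil, pvScan]
  | succ n ih =>
    intro l hlen
    cases l with
    | nil => simp [pvRep_nil, pvScan]
    | cons c t =>
      by_cases hA : pvAnd.isPrefixOf (c :: t)
      · obtain ⟨r, hr⟩ := List.isPrefixOf_iff_prefix.mp hA
        rw [← hr]
        rw [pvRep_append_self _ _ _ (by decide)]
        have h2 : pvRep pvPL ['('] ('&' :: pvRep pvAnd ['&'] r)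
            = '&' :: pvRep pvPL ['('] (pvRep pvAnd ['&'] r) := by
          apply pvRep_cons_of_ne
          rw [pvPL_eq]; exact pvNotPrefix_head _ _ _ _ (by decide)
        have h3 : pvRep pvPR [')'] ('&' :: pvRep pvPL ['('] (pvRep pvAnd ['&'] r))
            = '&' :: pvRep pvPR [')'] (pvRep pvPL ['('] (pvRep pvAnd ['&'] r)) := by
          apply pvRep_cons_of_ne
          rw [pvPR_eq]; exact pvNotPrefix_head _ _ _ _ (by decide)
        have hr' : r.length ≤ n := by
          have := congrArg List.length hr
          simp [pvAnd] at this
          simp at hlen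
          omega
        rw [List.singleton_append, h2, h3, ih r hr', pvScan_and]
      · by_cases hL : pvPL.isPrefixOf (c :: t)
        · obtain ⟨r, hr⟩ := List.isPrefixOf_iff_prefix.mp hL
          rw [← hr]
          rw [pvRep_skip _ _ _ _ (pvNoOcc _ _ pvFact_AND_PL r)]
          rw [pvRep_append_self _ _ _ (by decide)]
          have h3 : pvRep pvPR [')'] ('(' :: pvRep pvPL ['('] (pvRep pvAnd ['&'] r))
              = '(' :: pvRep pvPR [')'] (pvRep pvPL ['('] (pvRep pvAnd ['&'] r)) := by
            apply pvRep_cons_of_ne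
            rw [pvPR_eq]; exact pvNotPrefix_head _ _ _ _ (by decide)
          have hr' : r.length ≤ n := by
            have := congrArg List.length hr
            simp [pvPL] at this
            simp at hlen
            omega
          rw [show (['('] ++ pvRep pvPL ['('] (pvRep pvAnd ['&'] r) : List Char)
              = '(' :: pvRep pvPL ['('] (pvRep pvAnd ['&'] r) from rfl]
          rw [h3, ih r hr', pvScan_pl r (hr ▸ hA)]
        · by_cases hR : pvPR.isPrefixOf (c :: t)
          · obtain ⟨r, hr⟩ := List.isPrefixOf_iff_prefix.mp hR
            rw [← hr]
            rw [pvRep_skip _ _ _ _ (pvNoOcc _ _ pvFact_AND_PR r)]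
            rw [pvRep_skip _ _ _ _ (pvNoOcc _ _ pvFact_PL_PR (pvRep pvAnd ['&'] r))]
            rw [pvRep_append_self _ _ _ (by decide)]
            have hr' : r.length ≤ n := by
              have := congrArg List.length hr
              simp [pvPR] at this
              simp at hlen
              omega
            rw [show ([')'] ++ pvRep pvPR [')'] (pvRep pvPL ['('] (pvRep pvAnd ['&'] r)) : List Char)
                = ')' :: pvRep pvPR [')'] (pvRep pvPL ['('] (pvRep pvAnd ['&'] r)) from rfl]
            rw [ih r hr', pvScan_pr r (hr ▸ hA) (hr ▸ hL)]
          · -- no pattern starts at this position: all three scans copy c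
            rw [pvRep_cons_of_ne _ _ _ _ hA]
            have hL2 : ¬ pvPL.isPrefixOf (c :: pvRep pvAnd ['&'] t) := by
              intro hc
              apply hL
              rw [pvPL_eq] at hc ⊢
              simp only [List.isPrefixOf] at hc ⊢
              simp at hc
              obtain ⟨hc1, hc2⟩ := hc
              have := pvTransfer pvAnd '&' t.length t pvPLT le_rfl (by decide)
                (List.isPrefixOf_iff_prefix.mpr hc2)
              simp [this]
              exact hc1
            rw [pvRep_cons_of_ne _ _ _ _ hL2]
            have hR2 : ¬ pvPR.isPrefixOf (c :: pvRep pvPL ['('] (pvRep pvAnd ['&'] t)) := by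
              intro hc
              apply hR
              rw [pvPR_eq] at hc ⊢
              simp only [List.isPrefixOf] at hc ⊢
              simp at hc
              obtain ⟨hc1, hc2⟩ := hc
              have s1 := pvTransfer pvPL '(' (pvRep pvAnd ['&'] t).length
                (pvRep pvAnd ['&'] t) pvPRT le_rfl (by decide)
                (List.isPrefixOf_iff_prefix.mpr hc2)
              have s2 := pvTransfer pvAnd '&' t.length t pvPRT le_rfl (by decide) s1
              simp [s2]
              exact hc1
            rw [pvRep_cons_of_ne _ _ _ _ hR2]
            have ht : t.length ≤ n := by simp at hlen; omega
            rw [ih t ht, pvScan_cons_none c t hA hL hR]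

-- per-value agreement on Strings
theorem pvStage (el : String) (pat sym : String) (patL : List Char) (symC : Char)
    (hpat : pat.toList = patL) (hsym : sym.toList = [symC]) (hne : patL ≠ []) :
    (if PySem.Str.isIn pat el then PySem.Str.replace el pat sym else el)
      = String.ofList (pvRep patL [symC] el.toList) := by
  by_cases h : PySem.Str.isIn pat el
  · rw [if_pos h]
    show String.ofList (PySem.Chars.replace el.toList pat.toList sym.toList) = _
    rw [hpat, hsym, pvReplace_eq _ _ _ hne]
  · rw [if_neg h]
    have hni : ¬ patL <:+: el.toList := by
      rw [← hpat]
      intro hc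
      exact h ((PySem.Str.isIn_iff_infix pat el).mpr hc)
    rw [pvRep_of_not_infix _ _ _ hni, String.ofList_toList]

-- the per-value transformation A performs (the three guarded replaces, in order)
def pvF (el : String) : String :=
  if PySem.Str.isIn "parentheses_right_symbol"
      (if PySem.Str.isIn "parentheses_left_symbol"
          (if PySem.Str.isIn "and_symbol" el then PySem.Str.replace el "and_symbol" "&" else el)
        then PySem.Str.replace
          (if PySem.Str.isIn "and_symbol" el then PySem.Str.replace el "and_symbol" "&" else el)
          "parentheses_left_symbol" "("
        else (if PySem.Str.isIn "and_symbol" el then PySem.Str.replace el "and_symbol" "&" else el))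
  then PySem.Str.replace
      (if PySem.Str.isIn "parentheses_left_symbol"
          (if PySem.Str.isIn "and_symbol" el then PySem.Str.replace el "and_symbol" "&" else el)
        then PySem.Str.replace
          (if PySem.Str.isIn "and_symbol" el then PySem.Str.replace el "and_symbol" "&" else el)
          "parentheses_left_symbol" "("
        else (if PySem.Str.isIn "and_symbol" el then PySem.Str.replace el "and_symbol" "&" else el))
      "parentheses_right_symbol" ")"
  else
    (if PySem.Str.isIn "parentheses_left_symbol"
        (if PySem.Str.isIn "and_symbol" el then PySem.Str.replace el "and_symbol" "&" else el)
      then PySem.Str.replace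
        (if PySem.Str.isIn "and_symbol" el then PySem.Str.replace el "and_symbol" "&" else el)
        "parentheses_left_symbol" "("
      else (if PySem.Str.isIn "and_symbol" el then PySem.Str.replace el "and_symbol" "&" else el))

theorem pvF_eq (el : String) : pvF el = String.ofList (pvScan el.toList) := by
  unfold pvF
  rw [pvStage el "and_symbol" "&" pvAnd '&' rfl rfl (by decide)]
  rw [pvStage (String.ofList (pvRep pvAnd ['&'] el.toList))
    "parentheses_left_symbol" "(" pvPL '(' rfl rfl (by decide)]
  rw [String.toList_ofList]
  rw [pvStage _ "parentheses_right_symbol" ")" pvPR ')' rfl rfl (by decide)]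
  rw [String.toList_ofList]
  rw [pvMain el.toList.length _ le_rfl]

theorem pvA_items (dictionary : List (String × String)) :
    dict_treat dictionary = ((PySem.Dict.ofList dictionary).keys.foldl
      (fun nd i => nd.insert i (pvF ((PySem.Dict.ofList dictionary).getD i "")))
      PySem.Dict.empty).items := by
  unfold dict_treat pvF
  dsimp only
  simp only [show (PySem.Dict.ofList [("&","and_symbol"),("(","parentheses_left_symbol"),(")","parentheses_right_symbol")]).keys = ["&","(",")"] from by decide,
    List.foldl,
    show (PySem.Dict.ofList [("&","and_symbol"),("(","parentheses_left_symbol"),(")","parentheses_right_symbol")]).getD "&" "" = "and_symbol" from by decide,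
    show (PySem.Dict.ofList [("&","and_symbol"),("(","parentheses_left_symbol"),(")","parentheses_right_symbol")]).getD "(" "" = "parentheses_left_symbol" from by decide,
    show (PySem.Dict.ofList [("&","and_symbol"),("(","parentheses_left_symbol"),(")","parentheses_right_symbol")]).getD ")" "" = "parentheses_right_symbol" from by decide]

theorem pvA_map (dictionary : List (String × String)) :
    dict_treat dictionary = (PySem.Dict.ofList dictionary).keys.map
      (fun i => (i, pvF ((PySem.Dict.ofList dictionary).getD i ""))) := by
  rw [pvA_items]
  rw [PySem.Dict.items_foldl_insert_fresh _ (fun a => a) _ _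
    (fun a _ => PySem.Dict.contains_empty _)
    (by simpa using PySem.Dict.nodup_keys_ofList dictionary)]
  simp
  rfl

theorem pvB_map (dictionary : List (String × String)) :
    dict_treat_alt dictionary = (PySem.Dict.ofList dictionary).keys.map
      (fun i => (i, String.ofList (pvScan ((PySem.Dict.ofList dictionary).getD i "").toList))) := by
  unfold dict_treat_alt
  rw [PySem.Dict.items_eq_map_keys _ (PySem.Dict.nodup_keys_ofList _) ""]
  rw [List.map_map]
  rfl

-- ===== VERDICT (by name: the statement is the Claim_ definition above) =====
theorem dict_treat_spec : Claim_equal_dict_treat := by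
  intro dictionary _
  unfold Spec_dict_treat
  rw [pvA_map, pvB_map]
  simp only [pvF_eq]
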